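-- pv_equiv track=rewrite | github.com/AayanSrivastava/Data-Structures-and-Algorithms | PythonPractise/capgi.py | solve
-- ===== SOURCE A (Python) =====
-- def solve(s):
--     buff,x,cv=s[0], 1, 1
--     for i in range(1,len(s)):
--         if buff==s[i]:
--             cv+=1
--         else:
--             x*=cv
--             cv,buff = 1,s[i]
--     return x*cv%1007
-- ===== SOURCE B (Python) =====
-- def solve(s):
--     # Two staged passes: first find all run-boundary indices, then multiply the gaps.
--     n = len(s)
--     cuts = [i for i in range(1, n) if s[i] != s[i - 1]]
--     prod, prev = 1, 0
--     for c in cuts + [n]: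
--         prod *= c - prev
--         prev = c
--     return prod % 1007
-- ===== Notes on version B (the rewrite author's own statement) =====
-- stated objective: alternative
-- what changed: B is two staged passes: a comprehension first collects all run-boundary indices (where s[i] != s[i-1]) into a cuts list, then a separate loop multiplies the gaps between consecutive cuts, instead of A's single scan carrying (buff, x, cv) and folding the product inline; Pre_ excludes the empty string, on which A raises IndexError via s[0].
import Mathlib
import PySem

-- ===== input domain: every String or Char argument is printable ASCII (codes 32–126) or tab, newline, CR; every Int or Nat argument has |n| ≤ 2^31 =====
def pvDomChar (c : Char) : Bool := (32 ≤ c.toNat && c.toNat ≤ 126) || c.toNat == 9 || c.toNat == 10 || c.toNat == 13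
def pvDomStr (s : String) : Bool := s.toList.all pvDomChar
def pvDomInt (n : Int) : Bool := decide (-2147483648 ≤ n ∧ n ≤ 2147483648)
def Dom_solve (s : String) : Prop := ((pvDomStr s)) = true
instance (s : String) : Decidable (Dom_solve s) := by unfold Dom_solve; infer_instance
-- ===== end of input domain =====

-- B finds all run-boundary indices in one pass, then multiplies the gaps between
-- consecutive cuts in a second pass, instead of A's single scan folding the product
-- inline; Pre_ excludes the empty string, where A raises IndexError (s[0]).


-- ===== PORT A =====
-- the loop body: state (buff, x, cv), one step per character s[i] (i = 1 .. len-1)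
def solveStep (st : Char × Int × Int) (ch : Char) : Char × Int × Int :=
  if st.1 == ch then (st.1, st.2.1, st.2.2 + 1) else (ch, st.2.1 * st.2.2, 1)

def solve (s : String) : Int :=
  match s.toList with
  | [] => 0  -- unreachable under Pre_solve: Python raises IndexError at s[0]
  | c :: rest =>
    let st := rest.foldl solveStep (c, 1, 1)
    PySem.Int.mod (st.2.1 * st.2.2) 1007

-- ===== PORT B =====
-- body of 'for c in cuts + [n]: prod *= c - prev; prev = c', state (prod, prev)
def cutStep (st : Int × Int) (c : Int) : Int × Int := (st.1 * (c - st.2), c)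

-- indices in the comprehension 'range(1, n)' are always in range, so the getD
-- default ' ' is never consulted
def solve_alt (s : String) : Int :=
  let l := s.toList
  let n : Int := l.length
  let cuts := (PySem.List.pyRange 1 n 1).filter
      (fun i => !(l.getD i.toNat ' ' == l.getD (i - 1).toNat ' '))
  let st := (cuts ++ [n]).foldl cutStep (1, 0)
  PySem.Int.mod st.1 1007

-- ===== PRECONDITION & SPEC =====
-- Pre_ excludes only the empty string, on which A raises IndexError at s[0].
def Pre_solve (s : String) : Prop := s ≠ ""
instance (s : String) : Decidable (Pre_solve s) := by unfold Pre_solve; infer_instance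
def pvWitness_solve : String := "aab"

def Spec_solve (s : String) (out : Int) : Prop := out = solve_alt s
instance (s : String) (out : Int) : Decidable (Spec_solve s out) := by unfold Spec_solve; infer_instance

-- ===== CLAIM (what is proved, stated in full; the proofs are below) =====
def Claim_equal_solve : Prop := ∀ (s : String), Dom_solve s → Pre_solve s → Spec_solve s (solve s)

-- ===== LEMMAS AND PROOFS =====

-- Bridge: B's fold of gap products over the remaining cut indices (from position a)
-- equals A's accumulator fold over the remaining characters, when the A-state is
-- (the character before position a, the product so far, the current run length a - prev).
theorem bridge (l : List Char) (a : Nat) (ha : 1 ≤ a) (han : a ≤ l.length)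
    (prev x : Int) :
    (((PySem.List.pyRange (a : Int) (l.length : Int) 1).filter
        (fun i => !(l.getD i.toNat ' ' == l.getD (i - 1).toNat ' ')) ++
      [(l.length : Int)]).foldl cutStep (x, prev)).1
    = (let st := (l.drop a).foldl solveStep (l.getD (a - 1) ' ', x, (a : Int) - prev)
       st.2.1 * st.2.2) := by
  by_cases h : a < l.length
  · have hcons : PySem.List.pyRange (a : Int) (l.length : Int) 1
        = (a : Int) :: PySem.List.pyRange ((a : Int) + 1) (l.length : Int) 1 :=
      PySem.List.pyRange_one_cons (by exact_mod_cast h)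
    have ht1 : ((a : Int)).toNat = a := by omega
    have ht2 : ((a : Int) - 1).toNat = a - 1 := by omega
    have hdrop : l.drop a = l[a] :: l.drop (a + 1) := List.drop_eq_getElem_cons h
    have hgetd : l.getD a ' ' = l[a] := by
      simp [List.getD_eq_getElem?_getD, List.getElem?_eq_getElem h]
    have hcast : ((a : Int) + 1) = ((a + 1 : Nat) : Int) := by push_cast; ring
    rw [hcons, List.filter_cons]
    have hlt1 : a - 1 < l.length := by omega
    have hA : l[a]?.getD ' ' = l[a] := by rw [List.getElem?_eq_getElem h]; rfl
    have hA1 : l[a - 1]?.getD ' ' = l[a - 1] := by rw [List.getElem?_eq_getElem hlt1]; rfl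
    by_cases hp : l[a] = l[a - 1]
    · -- same character: no cut at a; A's step extends the current run
      rw [if_neg (by simp [ht1, ht2, List.getD_eq_getElem?_getD, hA, hA1, hp])]
      rw [hcast, bridge l (a + 1) (by omega) (by omega) prev x]
      rw [hdrop]
      have hstep : solveStep (l.getD (a - 1) ' ', x, (a : Int) - prev) l[a]
          = (l.getD (a - 1) ' ', x, (a : Int) - prev + 1) := by
        rw [solveStep, if_pos (by simp [List.getD_eq_getElem?_getD, hA1, hp])]
      simp only [List.foldl_cons, hstep]
      have hb : l.getD (a + 1 - 1) ' ' = l.getD (a - 1) ' ' := by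
        show l.getD a ' ' = _
        simp [List.getD_eq_getElem?_getD, hA, hA1, hp]
      rw [hb]
      have : ((a + 1 : Nat) : Int) - prev = (a : Int) - prev + 1 := by push_cast; ring
      rw [this]
    · -- boundary at a: B records the cut, A closes the run
      rw [if_pos (by simp [ht1, ht2, List.getD_eq_getElem?_getD, hA, hA1, hp])]
      simp only [List.cons_append, List.foldl_cons, cutStep]
      rw [hcast, bridge l (a + 1) (by omega) (by omega) (a : Int) (x * ((a : Int) - prev))]
      rw [hdrop]
      have hstep : solveStep (l.getD (a - 1) ' ', x, (a : Int) - prev) l[a]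
          = (l[a], x * ((a : Int) - prev), 1) := by
        rw [solveStep,
          if_neg (by simp [List.getD_eq_getElem?_getD, hA1]; exact fun hh => hp hh.symm)]
      simp only [List.foldl_cons, hstep]
      have hb : l.getD (a + 1 - 1) ' ' = l[a] := by
        show l.getD a ' ' = _
        simp [List.getD_eq_getElem?_getD, hA]
      rw [hb]
      have : ((a + 1 : Nat) : Int) - (a : Int) = 1 := by push_cast; ring
      rw [this]
  · -- a = length: no cuts remain; only the final sentinel n multiplies the last gap
    have haeq : a = l.length := by omega
    have hnil : PySem.List.pyRange (a : Int) (l.length : Int) 1 = [] :=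
      PySem.List.pyRange_one_eq_nil (by exact_mod_cast (le_of_eq haeq.symm))
    have hdrop : l.drop a = [] := List.drop_eq_nil_of_le (by omega)
    rw [hnil, hdrop]
    simp [cutStep, haeq]
termination_by l.length - a

theorem solve_spec : Claim_equal_solve := by
  intro s _ hpre
  unfold Spec_solve solve solve_alt
  have hne : s.toList ≠ [] := fun h => hpre (String.toList_eq_nil_iff.mp h)
  cases hl : s.toList with
  | nil => exact absurd hl hne
  | cons c rest =>
    simp only []
    have h1 : 1 ≤ (c :: rest).length := by simp
    have := bridge (c :: rest) 1 le_rfl h1 0 1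
    rw [Nat.cast_one] at this
    rw [this]
    simp
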